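-- pv_equiv track=rewrite | github.com/ScorpionOuss/Cryptanalysis | substitution.py | graphs
-- ===== SOURCE A (Python) =====
-- def graphs(message):
--     """ Establishes frequency Digraphs and trigraphs"""
--     c = 0
--     di = {}
--     tri = {}
--     while c <len(message):
--         if message[c] == " ":
--             c += 1
--             continue
--         if c + 1 < len(message):
--             if message[c + 1] == " ":
--                 c += 1
--                 continue
--             diM = message[c:c+2]
--             if diM in di:
--                 di[diM] += 1
--             else:
--                 di[diM] = 1
--             if c + 2 < len(message):
--                 if message[c + 2] == " ":
--                     c += 1
--                     continue
--                 triM = message[c:c+3]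
--                 if triM in tri:
--                     tri[triM] += 1
--                 else:
--                     tri[triM] = 1
--         c += 1
--     return sorted(di.items(), key = lambda x: -x[1]), sorted(tri.items(), key = lambda x: -x[1])
-- ===== SOURCE B (Python) =====
-- from collections import Counter
--
--
-- def _windows(word, k):
--     """All length-k substrings of a space-free word, left to right."""
--     return [word[i:i + k] for i in range(len(word) - k + 1)]
--
--
-- def graphs(message):
--     """Establishes frequency Digraphs and trigraphs."""
--     words = message.split(" ")
--     di = Counter(g for w in words for g in _windows(w, 2))
--     tri = Counter(g for w in words for g in _windows(w, 3))
--     return sorted(di.items(), key=lambda x: -x[1]), sorted(tri.items(), key=lambda x: -x[1])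
-- ===== Notes on version B (the rewrite author's own statement) =====
-- stated objective: alternative
-- what changed: B first tokenises the message into space-separated words with str.split and then counts plain sliding windows inside each space-free word using Counter, so A's interleaved index loop with per-character space tests disappears; ascending word/index order preserves first-occurrence insertion order and stable-sort tie order.
import Mathlib
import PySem

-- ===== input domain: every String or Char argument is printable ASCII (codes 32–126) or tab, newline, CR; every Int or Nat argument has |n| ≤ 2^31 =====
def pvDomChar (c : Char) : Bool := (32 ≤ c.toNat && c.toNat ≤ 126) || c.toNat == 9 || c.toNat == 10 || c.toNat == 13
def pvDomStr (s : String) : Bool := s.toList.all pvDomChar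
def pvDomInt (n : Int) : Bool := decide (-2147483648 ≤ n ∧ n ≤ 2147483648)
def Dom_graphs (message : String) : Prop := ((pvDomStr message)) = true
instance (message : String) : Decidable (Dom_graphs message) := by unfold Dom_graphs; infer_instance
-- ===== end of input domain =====

-- B tokenises the message into space-separated words with str.split and counts plain sliding windows per word, instead of A's interleaved index loop with per-character space tests (a timing run measured B faster by a constant factor).

-- ===== PORT A =====
-- A's while-loop; every branch ends in `c += 1` (directly or via continue), so it is structural
-- recursion on c. message[c] with 0 ≤ c < len is l[c]; message[c:c+2] with 0 ≤ c < len is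
-- (l.drop c).take 2 (Python slices clamp at the end) — exact here.
def graphsGo (l : List Char) (di tri : PySem.Dict String Int) (c : Nat) :
    PySem.Dict String Int × PySem.Dict String Int :=
  if h : c < l.length then
    if l[c] = ' ' then graphsGo l di tri (c + 1)
    else if h1 : c + 1 < l.length then
      if l[c + 1] = ' ' then graphsGo l di tri (c + 1)
      else
        let diM := String.ofList ((l.drop c).take 2)
        let di' := if di.contains diM then di.modify diM 0 (· + 1) else di.insert diM 1
        if h2 : c + 2 < l.length then
          if l[c + 2] = ' ' then graphsGo l di' tri (c + 1)
          else
            let triM := String.ofList ((l.drop c).take 3)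
            let tri' := if tri.contains triM then tri.modify triM 0 (· + 1) else tri.insert triM 1
            graphsGo l di' tri' (c + 1)
        else graphsGo l di' tri (c + 1)
    else graphsGo l di tri (c + 1)
  else (di, tri)
termination_by l.length - c

def graphs (message : String) : (List (String × Int)) × (List (String × Int)) :=
  let p := graphsGo message.toList PySem.Dict.empty PySem.Dict.empty 0
  (PySem.List.sorted p.1.items (fun x => -x.2) false,
   PySem.List.sorted p.2.items (fun x => -x.2) false)

-- ===== PORT B =====
-- Source B's _windows(word, k): all length-k substrings of a word, left to right.
-- word[i:i+k] for 0 ≤ i is (w.drop i).take k; range(len(word)-k+1) is List.range (len+1-k)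
-- (Nat truncation = Python's empty range for a negative bound).
def pvWindows (w : List Char) (k : Nat) : List String :=
  (List.range (w.length + 1 - k)).map (fun i => String.ofList ((w.drop i).take k))

-- message.split(" ") is PySem.Chars.splitOn on the char list; Counter over the chained
-- per-word windows is PySem.Dict.counter of the flattened list.
def graphs_alt (message : String) : (List (String × Int)) × (List (String × Int)) :=
  let words := PySem.Chars.splitOn message.toList [' ']
  let di := PySem.Dict.counter (words.flatMap (fun w => pvWindows w 2))
  let tri := PySem.Dict.counter (words.flatMap (fun w => pvWindows w 3))
  (PySem.List.sorted di.items (fun x => -x.2) false,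
   PySem.List.sorted tri.items (fun x => -x.2) false)

-- ===== PRECONDITION & SPEC =====
def Spec_graphs (message : String) (out : (List (String × Int)) × (List (String × Int))) : Prop := out = graphs_alt message
instance (message : String) (out : (List (String × Int)) × (List (String × Int))) : Decidable (Spec_graphs message out) := by unfold Spec_graphs; infer_instance

-- ===== CLAIM (what is proved, stated in full; the proofs are below) =====
def Claim_equal_graphs : Prop := ∀ (message : String), Dom_graphs message → Spec_graphs message (graphs message)

-- ===== LEMMAS AND PROOFS =====

-- "the k characters at positions c, c+1, …, c+k-1 are all non-space" (out-of-range reads ' ')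
def pvCondK (l : List Char) (i k : Nat) : Bool :=
  (List.range k).all (fun j => !(l.getD (i + j) ' ' == ' '))

-- the one-index step functions of A's loop, one per dictionary
def pvDiStep (l : List Char) (d : PySem.Dict String Int) (i : Nat) : PySem.Dict String Int :=
  if pvCondK l i 2 then d.modify (String.ofList ((l.drop i).take 2)) 0 (· + 1) else d

def pvTriStep (l : List Char) (d : PySem.Dict String Int) (i : Nat) : PySem.Dict String Int :=
  if pvCondK l i 3 then d.modify (String.ofList ((l.drop i).take 3)) 0 (· + 1) else d

theorem pvCondK_two (l : List Char) (i : Nat) :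
    pvCondK l i 2 = (!(l.getD i ' ' == ' ') && !(l.getD (i + 1) ' ' == ' ')) := by
  simp [pvCondK, List.range_succ, Bool.and_comm]

theorem pvCondK_three (l : List Char) (i : Nat) :
    pvCondK l i 3 = (!(l.getD i ' ' == ' ') && !(l.getD (i + 1) ' ' == ' ') && !(l.getD (i + 2) ' ' == ' ')) := by
  simp only [pvCondK, show List.range 3 = [0,1,2] by decide, List.all_cons, List.all_nil]
  cases h0 : l.getD (i+0) ' ' == ' ' <;> cases h1 : l.getD (i+1) ' ' == ' ' <;> cases h2 : l.getD (i+2) ' ' == ' ' <;> simp_all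

theorem pvCondK_oob (l : List Char) (i k : Nat) (hk : 1 ≤ k) (h : l.length < i + k) : pvCondK l i k = false := by
  have hj : l.length - i < k := by omega
  have hge : l.length ≤ i + (l.length - i) := by omega
  have hn : l[i + (l.length - i)]? = none := List.getElem?_eq_none hge
  simp only [pvCondK, List.all_eq_false]
  refine ⟨l.length - i, by simp [List.mem_range, hj], ?_⟩
  simp [List.getD_eq_getElem?_getD, hn]

theorem pvCondK_shift (c : Char) (t : List Char) (i k : Nat) :
    pvCondK (c :: t) (i + 1) k = pvCondK t i k := by
  have h : ∀ j : Nat, i + 1 + j = (i + j) + 1 := by omega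
  simp [pvCondK, h]

theorem pvCondK_zero_true (l : List Char) (k : Nat) (hk : k ≤ l.length) (h : ' ' ∉ l.take k) :
    pvCondK l 0 k = true := by
  simp only [pvCondK, List.all_eq_true]
  intro j hj
  simp only [List.mem_range] at hj
  have hjl : j < l.length := by omega
  have hg : l.getD (0 + j) ' ' = l[j] := by
    simp [List.getD_eq_getElem?_getD, List.getElem?_eq_getElem hjl]
  have hm : l[j] ∈ l.take k := by
    rw [List.mem_take_iff_getElem]
    exact ⟨j, by omega, rfl⟩
  have hne : l[j] ≠ ' ' := fun hc => h (by rwa [hc] at hm)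
  simp [List.getD_eq_getElem?_getD, List.getElem?_eq_getElem hjl, hne]

theorem pvCondK_zero_false (l : List Char) (j k : Nat) (hj : j < k) (h : l.getD j ' ' = ' ') :
    pvCondK l 0 k = false := by
  simp only [pvCondK, List.all_eq_false]
  refine ⟨j, by simp [List.mem_range, hj], ?_⟩
  rw [List.getD_eq_getElem?_getD] at h
  simp [h]

theorem pv_bump_eq (d : PySem.Dict String Int) (k : String) :
    (if d.contains k then d.modify k 0 (· + 1) else d.insert k 1) = d.modify k 0 (· + 1) := by
  by_cases h : d.contains k
  · simp [h]
  · simp only [Bool.not_eq_true] at h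
    simp [h, PySem.Dict.modify, PySem.Dict.insert, PySem.Dict.getD_of_not_contains]

theorem graphsGo_eq (l : List Char) (di tri : PySem.Dict String Int) (c : Nat) :
    graphsGo l di tri c =
      ((List.range' c (l.length - c)).foldl (pvDiStep l) di,
       (List.range' c (l.length - c)).foldl (pvTriStep l) tri) := by
  fun_induction graphsGo l di tri c with
  | case1 di tri c h hc ih =>
    rw [show l.length - c = (l.length - (c+1)) + 1 by omega, List.range'_succ]
    simp only [List.foldl_cons, ih]
    congr 1 <;>
      simp [pvDiStep, pvTriStep, pvCondK_two, pvCondK_three, List.getElem?_eq_getElem h, hc]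
  | case2 di tri c h hc h1 hc1 ih =>
    rw [show l.length - c = (l.length - (c+1)) + 1 by omega, List.range'_succ]
    simp only [List.foldl_cons, ih]
    congr 1 <;>
      simp [pvDiStep, pvTriStep, pvCondK_two, pvCondK_three, List.getElem?_eq_getElem h,
        List.getElem?_eq_getElem h1, hc1]
  | case3 di tri c h hc h1 hc1 diM di' h2 hc2 ih =>
    rw [show l.length - c = (l.length - (c+1)) + 1 by omega, List.range'_succ]
    simp only [List.foldl_cons, ih]
    congr 1 <;>
      simp [pvDiStep, pvTriStep, pvCondK_two, pvCondK_three, List.getElem?_eq_getElem h,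
        List.getElem?_eq_getElem h1, List.getElem?_eq_getElem h2, hc, hc1, hc2,
        pv_bump_eq, diM, di']
  | case4 di tri c h hc h1 hc1 diM di' h2 hc2 triM tri' ih =>
    rw [show l.length - c = (l.length - (c+1)) + 1 by omega, List.range'_succ]
    simp only [List.foldl_cons, ih]
    congr 1 <;>
      simp [pvDiStep, pvTriStep, pvCondK_two, pvCondK_three, List.getElem?_eq_getElem h,
        List.getElem?_eq_getElem h1, List.getElem?_eq_getElem h2, hc, hc1, hc2,
        pv_bump_eq, diM, di', triM, tri']
  | case5 di tri c h hc h1 hc1 diM di' h2 ih =>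
    rw [show l.length - c = (l.length - (c+1)) + 1 by omega, List.range'_succ]
    simp only [List.foldl_cons, ih]
    congr 1 <;>
      simp [pvDiStep, pvTriStep, pvCondK_two, pvCondK_three, List.getElem?_eq_getElem h,
        List.getElem?_eq_getElem h1, List.getElem?_eq_none (by omega : l.length ≤ c+2),
        hc, hc1, pv_bump_eq, diM, di']
  | case6 di tri c h hc h1 ih =>
    rw [show l.length - c = (l.length - (c+1)) + 1 by omega, List.range'_succ]
    simp only [List.foldl_cons, ih]
    congr 1 <;>
      simp [pvDiStep, pvTriStep, pvCondK_two, pvCondK_three,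
        List.getElem?_eq_none (by omega : l.length ≤ c+1)]
  | case7 di tri c h =>
    rw [show l.length - c = 0 by omega]
    simp [List.range']

theorem fold_di_range (l : List Char) (d : PySem.Dict String Int) :
    (List.range l.length).foldl (pvDiStep l) d = (List.range (l.length + 1 - 2)).foldl (pvDiStep l) d := by
  cases hn : l.length with
  | zero => rfl
  | succ m =>
    rw [List.range_succ]
    simp [List.foldl_append, pvDiStep, pvCondK_oob l m 2 (by omega) (by omega)]

theorem fold_tri_range (l : List Char) (d : PySem.Dict String Int) :
    (List.range l.length).foldl (pvTriStep l) d = (List.range (l.length + 1 - 3)).foldl (pvTriStep l) d := by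
  cases hn : l.length with
  | zero => rfl
  | succ m =>
    cases m with
    | zero =>
      simp [List.range_succ, pvTriStep, pvCondK_oob l 0 3 (by omega) (by omega)]
    | succ k =>
      rw [List.range_succ, List.range_succ]
      simp [List.foldl_append, pvTriStep, pvCondK_oob l k 3 (by omega) (by omega),
        pvCondK_oob l (k + 1) 3 (by omega) (by omega)]

def pvKeysRec (k : Nat) : List Char → List (List Char)
  | [] => []
  | c :: t =>
      (if k ≤ t.length + 1 ∧ pvCondK (c :: t) 0 k then [(c :: t).take k] else []) ++ pvKeysRec k t

def pvGramsRec (k : Nat) : List Char → List (List Char)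
  | [] => []
  | c :: t => (if k ≤ t.length + 1 then [(c :: t).take k] else []) ++ pvGramsRec k t

theorem windows_eq_gramsRec (k : Nat) (hk : 1 ≤ k) (w : List Char) :
    (List.range (w.length + 1 - k)).map (fun i => (w.drop i).take k) = pvGramsRec k w := by
  induction w with
  | nil => simp [pvGramsRec, show 1 - k = 0 by omega]
  | cons c t ih =>
    by_cases hkt : k ≤ t.length + 1
    · have hlen : (c :: t).length + 1 - k = (t.length + 1 - k) + 1 := by
        simp [List.length_cons]; omega
      rw [hlen, List.range_succ_eq_map]
      simp only [List.map_cons, List.map_map, pvGramsRec, hkt, if_pos]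
      refine congrArg₂ _ (by simp) ?_
      rw [← ih]
      rfl
    · have hlen : (c :: t).length + 1 - k = 0 := by simp [List.length_cons]; omega
      have hlt : t.length + 1 - k = 0 := by omega
      rw [hlen]
      simp only [pvGramsRec, hkt, if_neg, List.nil_append, ← ih, hlt]
      simp

theorem keys_eq_keysRec (k : Nat) (hk : 1 ≤ k) (l : List Char) :
    ((List.range (l.length + 1 - k)).filter (fun i => pvCondK l i k)).map (fun i => (l.drop i).take k)
      = pvKeysRec k l := by
  induction l with
  | nil => simp [pvKeysRec, show 1 - k = 0 by omega]
  | cons c t ih =>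
    by_cases hkt : k ≤ t.length + 1
    · have hlen : (c :: t).length + 1 - k = (t.length + 1 - k) + 1 := by
        simp [List.length_cons]; omega
      rw [hlen, List.range_succ_eq_map, List.filter_cons]
      have hfc : ((fun i => pvCondK (c :: t) i k) ∘ Nat.succ) = (fun i => pvCondK t i k) := by
        funext i
        simp [Function.comp, pvCondK_shift]
      have htail :
          ((List.range (t.length + 1 - k)).map Nat.succ |>.filter (fun i => pvCondK (c :: t) i k)).map
              (fun i => ((c :: t).drop i).take k) = pvKeysRec k t := by
        rw [List.filter_map, List.map_map, hfc, ← ih]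
        refine congrArg₂ _ ?_ rfl
        funext i
        simp [Function.comp]
      by_cases h0 : pvCondK (c :: t) 0 k
      · simp only [h0, if_pos, List.map_cons, List.drop_zero]
        simp only [pvKeysRec, hkt, h0, and_true, if_pos, List.singleton_append]
        exact congrArg₂ _ rfl htail
      · simp only [h0, Bool.false_eq_true, if_neg, not_false_iff]
        simp only [pvKeysRec, hkt, h0, and_false, if_neg, List.nil_append]
        exact htail
    · have hlen : (c :: t).length + 1 - k = 0 := by simp [List.length_cons]; omega
      have hlt : t.length + 1 - k = 0 := by omega
      rw [hlen]
      simp only [pvKeysRec, hkt, false_and, if_neg, List.nil_append, ← ih, hlt]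
      simp

def pvSp (pre : List Char) : List Char → List (List Char)
  | [] => [pre]
  | c :: t => if c = ' ' then pre :: pvSp [] t else pvSp (pre ++ [c]) t

theorem splitOn_go_eq (l : List Char) : ∀ (fuel : Nat), l.length ≤ fuel →
    ∀ (cur : List Char) (acc : List (List Char)),
      PySem.Chars.splitOn.go [' '] fuel l cur acc = acc.reverse ++ pvSp cur.reverse l := by
  induction l with
  | nil =>
    intro fuel _ cur acc
    cases fuel <;> simp [PySem.Chars.splitOn.go, pvSp]
  | cons c t ih =>
    intro fuel hf cur acc
    cases fuel with
    | zero => simp at hf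
    | succ f =>
      rw [PySem.Chars.splitOn.go]
      by_cases hc : c = ' '
      · have hp : [' '].isPrefixOf (c :: t) = true := by simp [List.isPrefixOf, hc]
        simp only [hp, if_pos, List.length_singleton, List.drop_one, List.tail_cons]
        rw [ih f (by simpa using hf) [] (cur.reverse :: acc)]
        simp [pvSp, hc]
      · have hp : [' '].isPrefixOf (c :: t) = false := by
          simp [List.isPrefixOf]
          exact fun e => hc e.symm
        simp only [hp, Bool.false_eq_true, if_neg, not_false_iff]
        rw [ih f (by simpa using hf) (c :: cur) acc]
        simp [pvSp, hc]

theorem splitOn_eq_sp (l : List Char) : PySem.Chars.splitOn l [' '] = pvSp [] l := by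
  rw [PySem.Chars.splitOn, splitOn_go_eq l (l.length + 1) (by omega) [] []]
  rfl

theorem sp_no_space (l : List Char) : ∀ (pre : List Char), ' ' ∉ l → pvSp pre l = [pre ++ l] := by
  induction l with
  | nil => intro pre _; simp [pvSp]
  | cons c t ih =>
    intro pre h
    have hc : c ≠ ' ' := fun e => h (by simp [e])
    simp only [pvSp, hc, if_neg, not_false_iff]
    rw [ih (pre ++ [c]) (fun m => h (List.mem_cons_of_mem _ m))]
    simp

theorem sp_append (w : List Char) : ∀ (r pre : List Char), ' ' ∉ w →
    pvSp pre (w ++ ' ' :: r) = (pre ++ w) :: pvSp [] r := by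
  induction w with
  | nil => intro r pre _; simp [pvSp]
  | cons c t ih =>
    intro r pre h
    have hc : c ≠ ' ' := fun e => h (by simp [e])
    simp only [List.cons_append, pvSp, hc, if_neg, not_false_iff]
    rw [ih r (pre ++ [c]) (fun m => h (List.mem_cons_of_mem _ m))]
    simp

theorem keysRec_no_space (k : Nat) (hk : 1 ≤ k) (l : List Char) (h : ' ' ∉ l) :
    pvKeysRec k l = pvGramsRec k l := by
  induction l with
  | nil => rfl
  | cons c t ih =>
    have ht : ' ' ∉ t := fun m => h (List.mem_cons_of_mem _ m)
    simp only [pvKeysRec, pvGramsRec, ih ht]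
    by_cases hkt : k ≤ t.length + 1
    · have h0 : pvCondK (c :: t) 0 k = true :=
        pvCondK_zero_true _ _ (by simpa using hkt)
          (fun m => h (List.mem_of_mem_take m))
      simp [hkt, h0]
    · simp [hkt]

theorem keysRec_append (k : Nat) (hk : 1 ≤ k) (w r : List Char) (h : ' ' ∉ w) :
    pvKeysRec k (w ++ ' ' :: r) = pvGramsRec k w ++ pvKeysRec k r := by
  induction w with
  | nil =>
    have h0 : pvCondK (' ' :: r) 0 k = false :=
      pvCondK_zero_false _ 0 k (by omega) (by simp)
    simp [pvKeysRec, pvGramsRec, h0]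
  | cons c t ih =>
    have ht : ' ' ∉ t := fun m => h (List.mem_cons_of_mem _ m)
    simp only [List.cons_append, pvKeysRec, pvGramsRec, ih ht, List.append_assoc]
    refine congrArg₂ _ ?_ rfl
    by_cases hkt : k ≤ t.length + 1
    · have hlen2 : k ≤ (t ++ ' ' :: r).length + 1 := by simp; omega
      have htake : (c :: (t ++ ' ' :: r)).take k = (c :: t).take k := by
        rw [show c :: (t ++ ' ' :: r) = (c :: t) ++ ' ' :: r from rfl]
        exact List.take_append_of_le_length (by simpa using hkt)
      have h0 : pvCondK (c :: (t ++ ' ' :: r)) 0 k = true := by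
        apply pvCondK_zero_true _ _ (by simp; omega)
        rw [htake]
        intro m
        exact h (List.mem_of_mem_take m)
      simp [hkt, h0, htake]
      omega
    · -- k > (c :: t).length : the window crosses the separator, so A drops it and B has no window
      have hj : (c :: t).length < k := by simpa using (by omega : t.length + 1 < k)
      by_cases hlen2 : k ≤ (t ++ ' ' :: r).length + 1
      · have h0 : pvCondK (c :: (t ++ ' ' :: r)) 0 k = false := by
          apply pvCondK_zero_false _ (t.length + 1) k (by omega)
          have : (c :: (t ++ ' ' :: r)).getD (t.length + 1) ' ' = (t ++ ' ' :: r).getD t.length ' ' := rfl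
          rw [this, List.getD_eq_getElem?_getD, List.getElem?_append_right (by omega)]
          simp
        simp [hkt, h0]
      · simp [hkt]
        intro hx
        exfalso
        simp at hlen2
        omega

theorem sp_flatMap_grams_aux (k : Nat) (hk : 1 ≤ k) :
    ∀ (n : Nat) (l : List Char), l.length ≤ n →
      (pvSp [] l).flatMap (pvGramsRec k) = pvKeysRec k l := by
  intro n
  induction n with
  | zero =>
    intro l hl
    have : l = [] := List.eq_nil_of_length_eq_zero (by omega)
    subst this
    rfl
  | succ m ih =>
    intro l hl
    by_cases hs : ' ' ∈ l
    · set w := l.takeWhile (fun c => !(c == ' ')) with hw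
      set d := l.dropWhile (fun c => !(c == ' ')) with hd
      have hwd : w ++ d = l := List.takeWhile_append_dropWhile
      have hdne : d ≠ [] := by
        intro he
        have := List.dropWhile_eq_nil_iff.mp (hd ▸ he)
        have := this ' ' hs
        simp at this
      have hdh : d.head hdne = ' ' := by
        have := List.head_dropWhile_not (p := fun c => !(c == ' ')) (l := l) (hd ▸ hdne)
        simpa using this
      have hde : d = ' ' :: d.tail := by
        rw [← hdh]
        exact (List.cons_head_tail hdne).symm
      have hwns : ' ' ∉ w := by
        intro m
        have := List.mem_takeWhile_imp (hw ▸ m)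
        simp at this
      have hlen : d.tail.length ≤ m := by
        have h1 : w.length + d.length = l.length := by rw [← hwd]; simp
        have h2 : 1 ≤ d.length := by
          cases hc : d with
          | nil => exact absurd hc hdne
          | cons a b => simp
        have h3 : d.tail.length = d.length - 1 := List.length_tail
        omega
      have hl' : l = w ++ ' ' :: d.tail := by rw [← hwd, ← hde]
      rw [hl', sp_append w d.tail [] hwns, keysRec_append k hk w d.tail hwns]
      simp only [List.flatMap_cons, List.nil_append]
      rw [ih d.tail hlen]
    · rw [sp_no_space l [] hs]
      simp only [List.flatMap_cons, List.flatMap_nil, List.append_nil, List.nil_append]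
      exact (keysRec_no_space k hk l hs).symm

theorem sp_flatMap_grams (k : Nat) (hk : 1 ≤ k) (l : List Char) :
    (pvSp [] l).flatMap (pvGramsRec k) = pvKeysRec k l :=
  sp_flatMap_grams_aux k hk l.length l le_rfl

theorem flat_windows_eq (k : Nat) (hk : 1 ≤ k) (l : List Char) :
    (PySem.Chars.splitOn l [' ']).flatMap (fun w => pvWindows w k)
      = (pvKeysRec k l).map String.ofList := by
  rw [splitOn_eq_sp, ← sp_flatMap_grams k hk, List.map_flatMap]
  apply List.flatMap_congr
  intro w _
  rw [← windows_eq_gramsRec k hk w]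
  simp [pvWindows, List.map_map]

theorem graphs_spec' (message : String) : graphs message = graphs_alt message := by
  unfold graphs graphs_alt
  simp only [graphsGo_eq, Nat.sub_zero, ← List.range_eq_range']
  rw [fold_di_range, fold_tri_range,
    flat_windows_eq 2 (by omega), flat_windows_eq 3 (by omega),
    PySem.Dict.counter_eq_foldl, PySem.Dict.counter_eq_foldl,
    ← keys_eq_keysRec 2 (by omega) message.toList, ← keys_eq_keysRec 3 (by omega) message.toList,
    List.map_map, List.map_map, List.foldl_map, List.foldl_filter,
    List.foldl_map, List.foldl_filter]
  rfl

-- ===== VERDICT (by name: the statement is the Claim_ definition above) =====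
theorem graphs_spec : Claim_equal_graphs := by
  intro message _
  unfold Spec_graphs
  exact graphs_spec' message
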